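-- pv_equiv track=rewrite | github.com/xuguipinga/happy8 | happy8-analysis/app/services/pattern.py | calculate_ac_value
-- ===== SOURCE A (Python) =====
-- def calculate_ac_value(numbers):
--     """
--     计算AC值（算术复杂度）
--
--     Args:
--         numbers: 号码列表
--
--     Returns:
--         int: AC值
--     """
--     if len(numbers) < 2:
--         return 0
--
--     nums = sorted([int(n) for n in numbers])
--
--     # 计算所有两两之差的绝对值
--     differences = set()
--     for i in range(len(nums)):
--         for j in range(i + 1, len(nums)):
--             diff = abs(nums[i] - nums[j])
--             differences.add(diff)
--
--     # AC值 = 差值个数 - (号码个数 - 1)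
--     ac_value = len(differences) - (len(nums) - 1)
--     return ac_value
-- ===== SOURCE B (Python) =====
-- def calculate_ac_value(numbers):
--     """
--     计算AC值（算术复杂度） — re-implementation over the deduplicated sorted values.
--
--     Args:
--         numbers: 号码列表
--
--     Returns:
--         int: AC值
--     """
--     n = len(numbers)
--     if n < 2:
--         return 0
--
--     vals = sorted({int(x) for x in numbers})
--
--     # gaps between distinct values: every positive pairwise difference, once each
--     diffs = set()
--     rest = vals
--     while rest:
--         v = rest[0]
--         rest = rest[1:]
--         diffs.update(w - v for w in rest)
--
--     distinct = len(diffs)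
--     # difference 0 occurs exactly when some value repeats
--     if len(vals) < n:
--         distinct += 1
--
--     return distinct - (n - 1)
-- ===== Notes on version B (the rewrite author's own statement) =====
-- stated objective: alternative
-- what changed: B deduplicates the values first and walks suffixes of the strictly sorted distinct values collecting gaps w-v (no index pairs, no abs), adding 1 for difference 0 exactly when some value repeats, instead of A's nested index loops over all pairs of the sorted multiset.
import Mathlib
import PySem

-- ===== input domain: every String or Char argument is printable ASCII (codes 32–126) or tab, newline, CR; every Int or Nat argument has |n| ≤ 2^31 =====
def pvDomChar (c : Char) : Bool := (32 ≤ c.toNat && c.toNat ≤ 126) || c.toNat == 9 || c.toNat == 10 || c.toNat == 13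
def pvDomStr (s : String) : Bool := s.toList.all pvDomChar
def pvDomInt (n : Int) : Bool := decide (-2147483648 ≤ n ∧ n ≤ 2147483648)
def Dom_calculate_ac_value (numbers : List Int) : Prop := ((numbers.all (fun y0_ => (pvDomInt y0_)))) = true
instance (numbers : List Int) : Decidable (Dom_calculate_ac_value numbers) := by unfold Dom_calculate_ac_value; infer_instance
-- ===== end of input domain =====

-- B replaces A's nested index loops over all pairs of the sorted multiset by a suffix walk over the
-- deduplicated strictly sorted values (gaps w - v, no abs), adding 1 for difference 0 exactly when a
-- value repeats: an alternative decomposition of the same task.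

-- ===== PORT A =====
def calculate_ac_value (numbers : List Int) : Int :=
  if numbers.length < 2 then 0
  else
    let nums := PySem.List.sorted (numbers.map (fun n => n)) (fun x => x) false
    let diffs := (PySem.List.pyRange 0 (nums.length : Int) 1).foldl (fun s i =>
        (PySem.List.pyRange (i + 1) (nums.length : Int) 1).foldl (fun t j =>
          PySem.Set.add t |PySem.List.pyGetD nums i 0 - PySem.List.pyGetD nums j 0|) s)
      PySem.Set.empty
    PySem.Set.len diffs - ((nums.length : Int) - 1)

-- ===== PORT B =====
-- the while-loop of Source B: rest = vals; while rest: v, rest = rest[0], rest[1:]; diffs.update(w - v for w in rest)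
def pvAltLoop : PySem.Set Int → List Int → PySem.Set Int
  | s, [] => s
  | s, v :: rest => pvAltLoop (PySem.Set.update s (rest.map (fun w => w - v))) rest

def calculate_ac_value_alt (numbers : List Int) : Int :=
  if numbers.length < 2 then 0
  else
    let vals := PySem.List.sorted (PySem.Set.ofList (numbers.map (fun x => x))) (fun x => x) false
    let diffs := pvAltLoop PySem.Set.empty vals
    let distinct : Int := PySem.Set.len diffs
    let distinct := if (vals.length : Int) < (numbers.length : Int) then distinct + 1 else distinct
    distinct - ((numbers.length : Int) - 1)

-- ===== PRECONDITION & SPEC =====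
def Spec_calculate_ac_value (numbers : List Int) (out : Int) : Prop := out = calculate_ac_value_alt numbers
instance (numbers : List Int) (out : Int) : Decidable (Spec_calculate_ac_value numbers out) := by unfold Spec_calculate_ac_value; infer_instance

-- ===== CLAIM (what is proved, stated in full; the proofs are below) =====
def Claim_equal_calculate_ac_value : Prop := ∀ (numbers : List Int), Dom_calculate_ac_value numbers → Spec_calculate_ac_value numbers (calculate_ac_value numbers)

-- ===== LEMMAS AND PROOFS =====

-- membership in A's nested pair loop
theorem pv_mem_nested (f : Int → Int → Int) (g : Int → List Int) (out : List Int)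
    (s : PySem.Set Int) (y : Int) :
    y ∈ out.foldl (fun s i => (g i).foldl (fun t j => PySem.Set.add t (f i j)) s) s ↔
      y ∈ s ∨ ∃ i ∈ out, ∃ j ∈ g i, y = f i j := by
  induction out generalizing s with
  | nil => simp
  | cons x xs ih =>
    rw [List.foldl_cons, ih, PySem.Set.mem_foldl_add]
    simp only [List.mem_cons]
    constructor
    · rintro ((h | ⟨j, hj, rfl⟩) | ⟨i, hi, j, hj, rfl⟩)
      · exact Or.inl h
      · exact Or.inr ⟨x, Or.inl rfl, j, hj, rfl⟩
      · exact Or.inr ⟨i, Or.inr hi, j, hj, rfl⟩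
    · rintro (h | ⟨i, (rfl | hi), j, hj, rfl⟩)
      · exact Or.inl (Or.inl h)
      · exact Or.inl (Or.inr ⟨j, hj, rfl⟩)
      · exact Or.inr ⟨i, hi, j, hj, rfl⟩

theorem pv_nodup_foldl_add (f : Int → Int) (l : List Int) (s : PySem.Set Int)
    (h : s.Nodup) : (l.foldl (fun t j => PySem.Set.add t (f j)) s).Nodup := by
  induction l generalizing s with
  | nil => exact h
  | cons x xs ih => exact ih _ (PySem.Set.nodup_add _ _ h)

theorem pv_nodup_nested (f : Int → Int → Int) (g : Int → List Int) (out : List Int)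
    (s : PySem.Set Int) (h : s.Nodup) :
    (out.foldl (fun s i => (g i).foldl (fun t j => PySem.Set.add t (f i j)) s) s).Nodup := by
  induction out generalizing s with
  | nil => exact h
  | cons x xs ih => exact ih _ (pv_nodup_foldl_add _ _ _ h)

theorem pv_mem_altLoop (s : PySem.Set Int) (l : List Int) (y : Int) :
    y ∈ pvAltLoop s l ↔ y ∈ s ∨ ∃ a b, List.Sublist [a, b] l ∧ y = b - a := by
  induction l generalizing s with
  | nil => simp [pvAltLoop]
  | cons v rest ih =>
    rw [pvAltLoop, ih, PySem.Set.mem_update]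
    constructor
    · rintro ((h | h) | ⟨a, b, hs, rfl⟩)
      · exact Or.inl h
      · obtain ⟨w, hw, rfl⟩ := List.mem_map.mp h
        exact Or.inr ⟨v, w, (List.singleton_sublist.mpr hw).cons₂ v, rfl⟩
      · exact Or.inr ⟨a, b, hs.cons v, rfl⟩
    · rintro (h | ⟨a, b, hs, rfl⟩)
      · exact Or.inl (Or.inl h)
      · rcases List.sublist_cons_iff.mp hs with h' | ⟨r, hr, hr'⟩
        · exact Or.inr ⟨a, b, h', rfl⟩
        · cases hr
          exact Or.inl (Or.inr (List.mem_map.mpr ⟨b, List.singleton_sublist.mp hr', rfl⟩))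

theorem pv_nodup_altLoop (s : PySem.Set Int) (l : List Int) (h : s.Nodup) :
    (pvAltLoop s l).Nodup := by
  induction l generalizing s with
  | nil => exact h
  | cons v rest ih => exact ih _ (PySem.Set.nodup_update _ _ h)

-- two members a < b of a ≤-sorted list form the sublist [a, b]
theorem pv_pair_sublist {l : List Int} {a b : Int} (h : l.Pairwise (· ≤ ·))
    (ha : a ∈ l) (hb : b ∈ l) (hab : a < b) : List.Sublist [a, b] l := by
  induction l with
  | nil => cases ha
  | cons x t ih =>
    rw [List.pairwise_cons] at h
    rcases List.mem_cons.mp ha with rfl | ha'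
    · have hb' : b ∈ t := by
        rcases List.mem_cons.mp hb with rfl | hb' 
        · exact absurd hab (lt_irrefl b)
        · exact hb'
      exact (List.singleton_sublist.mpr hb').cons₂ a
    · have hb' : b ∈ t := by
        rcases List.mem_cons.mp hb with rfl | hb'
        · exact absurd (h.1 a ha') (not_le.mpr hab)
        · exact hb'
      exact (ih h.2 ha' hb').cons x

-- membership in A's diff set, in sublist language
theorem pv_memA (l : List Int) (y : Int) :
    y ∈ (PySem.List.pyRange 0 (l.length : Int) 1).foldl (fun s i =>
        (PySem.List.pyRange (i + 1) (l.length : Int) 1).foldl (fun t j =>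
          PySem.Set.add t |PySem.List.pyGetD l i 0 - PySem.List.pyGetD l j 0|) s)
      PySem.Set.empty ↔ ∃ a b, List.Sublist [a, b] l ∧ y = |a - b| := by
  rw [pv_mem_nested]
  constructor
  · rintro (h | ⟨i, hi, j, hj, rfl⟩)
    · cases h
    · rw [PySem.List.mem_pyRange_one] at hi hj
      have h0i : 0 ≤ i := hi.1
      have h0j : 0 ≤ j := le_trans (le_trans h0i (by omega)) hj.1
      have hij : i.toNat < j.toNat := by omega
      have hjl : j.toNat < l.length := by omega
      have hil : i.toNat < l.length := by omega
      have hsub : List.Sublist (List.map (fun x => l[x]) [(⟨i.toNat, hil⟩ : Fin l.length), ⟨j.toNat, hjl⟩]) l :=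
        List.map_getElem_sublist (by simp [hij])
      refine ⟨l[i.toNat], l[j.toNat], hsub, ?_⟩
      rw [PySem.List.pyGetD_of_nonneg _ _ h0i, PySem.List.pyGetD_of_nonneg _ _ h0j,
        List.getD_eq_getElem _ _ hil, List.getD_eq_getElem _ _ hjl]
  · rintro ⟨a, b, hs, rfl⟩
    obtain ⟨is, heq, hp⟩ := List.sublist_eq_map_getElem hs
    match is, heq, hp with
    | [i, j], heq, hp =>
      have hij : i < j := by
        rcases List.pairwise_cons.mp hp with ⟨h1, _⟩
        exact h1 j (List.mem_singleton.mpr rfl)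
      have ha : a = l[i] := by simpa using congrArg (fun xs => xs.getD 0 0) heq
      have hb : b = l[j] := by simpa using congrArg (fun xs => xs.getD 1 0) heq
      refine Or.inr ⟨(i : Int), ?_, (j : Int), ?_, ?_⟩
      · rw [PySem.List.mem_pyRange_one]
        exact ⟨Int.natCast_nonneg _, by exact_mod_cast i.isLt⟩
      · rw [PySem.List.mem_pyRange_one]
        constructor
        · exact_mod_cast hij
        · exact_mod_cast j.isLt
      · rw [PySem.List.pyGetD_natCast, PySem.List.pyGetD_natCast,
          List.getD_eq_getElem _ _ i.isLt, List.getD_eq_getElem _ _ j.isLt, ha, hb]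
        rfl

-- the central correspondence between the two diff predicates
theorem pv_key (numbers nums vals : List Int) (y : Int)
    (hperm : nums.Perm numbers) (hnle : nums.Pairwise (· ≤ ·))
    (hvlt : vals.Pairwise (· < ·)) (hmemv : ∀ x : Int, x ∈ vals ↔ x ∈ numbers) :
    (∃ a b, List.Sublist [a, b] nums ∧ y = |a - b|) ↔
      ((y = 0 ∧ ¬ numbers.Nodup) ∨ (∃ a b, List.Sublist [a, b] vals ∧ y = b - a)) := by
  have hmemn : ∀ x : Int, x ∈ nums ↔ x ∈ numbers := fun x => hperm.mem_iff
  constructor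
  · rintro ⟨a, b, hs, rfl⟩
    have hab : a ≤ b := (List.pairwise_cons.mp (List.Pairwise.sublist hs hnle)).1 b (List.mem_singleton.mpr rfl)
    rcases eq_or_lt_of_le hab with rfl | hlt
    · refine Or.inl ⟨by simp, ?_⟩
      intro hnd
      exact (List.nodup_iff_sublist.mp (hperm.nodup_iff.mpr hnd)) a hs
    · have ha : a ∈ vals := (hmemv a).mpr ((hmemn a).mp (hs.subset (by simp)))
      have hb : b ∈ vals := (hmemv b).mpr ((hmemn b).mp (hs.subset (by simp)))
      refine Or.inr ⟨a, b, pv_pair_sublist (hvlt.imp le_of_lt) ha hb hlt, ?_⟩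
      rw [abs_of_nonpos (by omega)]; ring
  · rintro (⟨rfl, hnd⟩ | ⟨a, b, hs, rfl⟩)
    · have : ¬ nums.Nodup := fun h => hnd (hperm.nodup_iff.mp h)
      rw [List.nodup_iff_sublist] at this
      rw [not_forall] at this
      simp only [not_not] at this
      obtain ⟨a, ha⟩ := this
      exact ⟨a, a, ha, by simp⟩
    · have hab : a < b := (List.pairwise_cons.mp (List.Pairwise.sublist hs hvlt)).1 b (List.mem_singleton.mpr rfl)
      have ha : a ∈ nums := (hmemn a).mpr ((hmemv a).mp (hs.subset (by simp)))
      have hb : b ∈ nums := (hmemn b).mpr ((hmemv b).mp (hs.subset (by simp)))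
      refine ⟨a, b, pv_pair_sublist hnle ha hb hab, ?_⟩
      rw [abs_of_nonpos (by omega)]; ring

-- set(xs) is strictly smaller than xs exactly when xs has a repeat
theorem pv_ofList_length_lt {xs : List Int} (h : ¬ xs.Nodup) :
    (PySem.Set.ofList xs).length < xs.length := by
  rcases lt_or_eq_of_le (PySem.Set.length_ofList_le xs) with h' | h'
  · exact h'
  · exfalso
    have hsub : (PySem.Set.ofList xs).Subperm xs :=
      List.subperm_of_subset (PySem.Set.nodup_ofList xs) (fun x hx => (PySem.Set.mem_ofList xs x).mp hx)
    have hperm : (PySem.Set.ofList xs).Perm xs := hsub.perm_of_length_le (le_of_eq h'.symm)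
    exact h (hperm.nodup_iff.mp (PySem.Set.nodup_ofList xs))

-- ===== VERDICT (by name: the statement is the Claim_ definition above) =====
theorem calculate_ac_value_spec : Claim_equal_calculate_ac_value := by
  intro numbers _
  unfold Spec_calculate_ac_value calculate_ac_value calculate_ac_value_alt
  by_cases hlen : numbers.length < 2
  · simp [hlen]
  · simp only [hlen, if_false]
    have hmapid : numbers.map (fun n => n) = numbers := List.map_id' numbers
    set nums := PySem.List.sorted (numbers.map (fun n => n)) (fun x => x) false with hnums
    set vals := PySem.List.sorted (PySem.Set.ofList (numbers.map (fun x => x))) (fun x => x) false with hvals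
    set SA := (PySem.List.pyRange 0 (nums.length : Int) 1).foldl (fun s i =>
        (PySem.List.pyRange (i + 1) (nums.length : Int) 1).foldl (fun t j =>
          PySem.Set.add t |PySem.List.pyGetD nums i 0 - PySem.List.pyGetD nums j 0|) s)
      PySem.Set.empty with hSA
    set SB := pvAltLoop PySem.Set.empty vals with hSB
    have hnlen : nums.length = numbers.length := by
      rw [hnums, PySem.List.length_sorted, hmapid]
    have hvlen : vals.length = (PySem.Set.ofList numbers).length := by
      rw [hvals, PySem.List.length_sorted, hmapid]
    have hSAnd : SA.Nodup := pv_nodup_nested _ _ _ _ (List.nodup_nil)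
    have hSBnd : SB.Nodup := pv_nodup_altLoop _ _ (List.nodup_nil)
    have hmemSA : ∀ y, y ∈ SA ↔ (∃ a b, List.Sublist [a, b] nums ∧ y = |a - b|) := fun y => pv_memA nums y
    have hmemSB : ∀ y, y ∈ SB ↔ (∃ a b, List.Sublist [a, b] vals ∧ y = b - a) := by
      intro y
      rw [hSB, pv_mem_altLoop]
      simp [PySem.Set.empty]
    have hvlt : vals.Pairwise (· < ·) := by
      rw [hvals]; exact PySem.List.sorted_ofList_pairwise_lt _
    have hperm0 : nums.Perm numbers := by
      rw [hnums]
      have h2 : (numbers.map (fun n => n)).Perm numbers := by rw [hmapid]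
      exact (PySem.List.sorted_perm _ _ _).trans h2
    have hnle : nums.Pairwise (· ≤ ·) := by
      rw [hnums]; exact PySem.List.sorted_pairwise _ _
    have hmemv : ∀ x : Int, x ∈ vals ↔ x ∈ numbers := by
      intro x
      rw [hvals, PySem.List.mem_sorted, PySem.Set.mem_ofList, hmapid]
    have h0SB : (0 : Int) ∉ SB := by
      rw [hmemSB]
      rintro ⟨a, b, hs, h0⟩
      have hab : a < b := (List.pairwise_cons.mp (List.Pairwise.sublist hs hvlt)).1 b (List.mem_singleton.mpr rfl)
      omega
    by_cases hnd : numbers.Nodup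
    · have hperm : SA.Perm SB := by
        rw [List.perm_ext_iff_of_nodup hSAnd hSBnd]
        intro y
        rw [hmemSA, hmemSB, pv_key numbers nums vals y hperm0 hnle hvlt hmemv]
        constructor
        · rintro (⟨_, h⟩ | h)
          · exact absurd hnd h
          · exact h
        · exact Or.inr
      have hcond : ¬ ((vals.length : Int) < (numbers.length : Int)) := by
        rw [hvlen, PySem.Set.ofList_eq_self_of_nodup _ hnd]
        omega
      rw [if_neg hcond]
      have : SA.length = SB.length := hperm.length_eq
      simp only [PySem.Set.len, hnlen]
      omega
    · have hperm : SA.Perm (0 :: SB) := by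
        rw [List.perm_ext_iff_of_nodup hSAnd (List.nodup_cons.mpr ⟨h0SB, hSBnd⟩)]
        intro y
        rw [hmemSA, List.mem_cons, hmemSB, pv_key numbers nums vals y hperm0 hnle hvlt hmemv]
        constructor
        · rintro (⟨h0, _⟩ | h)
          · exact Or.inl h0
          · exact Or.inr h
        · rintro (rfl | h)
          · exact Or.inl ⟨rfl, hnd⟩
          · exact Or.inr h
      have hcond : (vals.length : Int) < (numbers.length : Int) := by
        rw [hvlen]
        exact_mod_cast pv_ofList_length_lt hnd
      rw [if_pos hcond]
      have : SA.length = SB.length + 1 := by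
        rw [hperm.length_eq]; rfl
      simp only [PySem.Set.len, hnlen]
      omega
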